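-- pv_equiv track=rewrite | github.com/Aasthaengg/IBMdataset | Python_codes/p02715/s750910542.py | find
-- ===== SOURCE A (Python) =====
-- def find(N,K):
--     MOD = 10**9+7
--     number = [1]*(K+1)
--     for i in range(K,0,-1):
--         number[i] = pow(K//i,N,MOD)
--         for j in range(2,K+1):
--             if i*j>K:
--                 break
--             number[i] -= number[i*j]
--             number[i] %= MOD
--     ans = 0
--     for k in range(1,K+1):
--         ans += number[k]*k
--         ans %= MOD
--     return ans
-- ===== SOURCE B (Python) =====
-- def find(N, K):
--     MOD = 10**9 + 7
--     # phi[m] ends up as Euler's totient of m, via phi[m] = m - sum of phi[d] over proper divisors d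
--     phi = list(range(K + 1))
--     for n in range(1, K + 1):
--         for m in range(2 * n, K + 1, n):
--             phi[m] -= phi[n]
--     ans = 0
--     for d in range(1, K + 1):
--         ans = (ans + phi[d] * pow(K // d, N, MOD)) % MOD
--     return ans
-- ===== Notes on version B (the rewrite author's own statement) =====
-- stated objective: alternative
-- what changed: Replaces A's downward inclusion-exclusion table of exact-gcd sequence counts (number[i] = pow(K//i,N,MOD) minus the entries at proper multiples, then a weighted sum sum k*number[k]) with a totient-sieve decomposition: build phi[1..K] by the divisor-sum sieve phi[m] = m - sum of phi[d] over proper divisors, then accumulate ans = sum phi[d]*pow(K//d,N,MOD) in one flat modular loop, using the identity g = sum_{d|g} phi(d).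
import Mathlib
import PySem

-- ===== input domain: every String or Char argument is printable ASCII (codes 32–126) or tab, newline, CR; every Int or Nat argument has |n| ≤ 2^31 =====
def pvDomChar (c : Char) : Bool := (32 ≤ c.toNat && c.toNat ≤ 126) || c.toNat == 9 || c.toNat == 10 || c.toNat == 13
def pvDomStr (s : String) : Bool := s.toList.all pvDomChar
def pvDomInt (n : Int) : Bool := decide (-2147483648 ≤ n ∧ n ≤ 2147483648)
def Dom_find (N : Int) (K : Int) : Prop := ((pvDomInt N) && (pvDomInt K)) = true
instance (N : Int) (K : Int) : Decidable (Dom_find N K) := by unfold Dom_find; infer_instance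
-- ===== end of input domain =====

-- B replaces A's downward inclusion-exclusion table of exact-gcd counts by a totient sieve plus one
-- flat modular accumulation (identity g = Σ_{d∣g} φ(d)); same asymptotic cost, different decomposition.

-- ===== PORT A =====
-- Python's three-argument pow(b, e, m).  e ≥ 0 is PySem.Int.powMod; a NEGATIVE exponent (not covered
-- by PySem) is ported by hand exactly as CPython computes it: the modular inverse of b (extended
-- Euclid, reduced into [0, m)), raised to -e mod m.  Exact whenever Python returns a value (for
-- e < 0 Python raises ValueError unless gcd(b % m, m) = 1; on such inputs BOTH Pythons raise in the
-- same call, so no value of A is being claimed there).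
def pyPow3 (b : Int) (e : Int) (m : Int) : Int :=
  if 0 ≤ e then PySem.Int.powMod b e.toNat m
  else PySem.Int.powMod (PySem.Int.mod (Nat.gcdA (PySem.Int.mod b m).toNat m.toNat) m) (-e).toNat m

-- The Python lists are mutable arrays indexed by provably nonnegative in-range indices, so they are
-- ported as Array Int; aget/aset are xs[i] / xs[i] = v for such an index (exact there).
def aget (xs : Array Int) (i : Int) : Int := xs.getD i.toNat 0
def aset (xs : Array Int) (i : Int) (v : Int) : Array Int := xs.setIfInBounds i.toNat v

-- 'for j in range(2, K+1): if i*j > K: break; number[i] -= number[i*j]; number[i] %= MOD'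
-- (js is the list range(2, K+1), built once like Python's lazy range object)
def findInner (K MOD i : Int) : List Int → Array Int → Array Int
  | [], number => number
  | j :: js, number =>
    if i * j > K then number
    else findInner K MOD i js
      (aset number i (PySem.Int.mod (aget number i - aget number (i * j)) MOD))

-- 'for i in range(K, 0, -1): number[i] = pow(K//i, N, MOD); <inner loop>'
def findOuter (N K MOD : Int) (js : List Int) : List Int → Array Int → Array Int
  | [], number => number
  | i :: is, number =>
    findOuter N K MOD js is
      (findInner K MOD i js (aset number i (pyPow3 (PySem.Int.floordiv K i) N MOD)))

-- 'for k in range(1, K+1): ans += number[k]*k; ans %= MOD'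
def findAns (MOD : Int) (number : Array Int) : List Int → Int → Int
  | [], ans => ans
  | k :: ks, ans =>
    findAns MOD number ks (PySem.Int.mod (ans + aget number k * k) MOD)

def find (N : Int) (K : Int) : Int :=
  let MOD : Int := 1000000007
  let number : Array Int := Array.replicate (K + 1).toNat 1
  let number := findOuter N K MOD (PySem.List.pyRange 2 (K + 1) 1)
    (PySem.List.pyRange K 0 (-1)) number
  findAns MOD number (PySem.List.pyRange 1 (K + 1) 1) 0

-- ===== PORT B =====
-- 'for m in range(2*n, K+1, n): phi[m] -= phi[n]'
def altInner (K n : Int) : List Int → Array Int → Array Int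
  | [], phi => phi
  | m :: ms, phi =>
    altInner K n ms (aset phi m (aget phi m - aget phi n))

-- 'for n in range(1, K+1): <inner loop>'
def altOuter (K : Int) : List Int → Array Int → Array Int
  | [], phi => phi
  | n :: ns, phi => altOuter K ns (altInner K n (PySem.List.pyRange (2 * n) (K + 1) n) phi)

-- 'for d in range(1, K+1): ans = (ans + phi[d] * pow(K//d, N, MOD)) % MOD'
def altAns (N K MOD : Int) (phi : Array Int) : List Int → Int → Int
  | [], ans => ans
  | d :: ds, ans =>
    altAns N K MOD phi ds
      (PySem.Int.mod (ans + aget phi d * pyPow3 (PySem.Int.floordiv K d) N MOD) MOD)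

def find_alt (N : Int) (K : Int) : Int :=
  let MOD : Int := 1000000007
  let phi : Array Int := (PySem.List.pyRange 0 (K + 1) 1).toArray
  let phi := altOuter K (PySem.List.pyRange 1 (K + 1) 1) phi
  altAns N K MOD phi (PySem.List.pyRange 1 (K + 1) 1) 0

-- ===== PRECONDITION & SPEC =====
def Spec_find (N : Int) (K : Int) (out : Int) : Prop := out = find_alt N K
instance (N : Int) (K : Int) (out : Int) : Decidable (Spec_find N K out) := by unfold Spec_find; infer_instance

-- ===== CLAIM (what is proved, stated in full; the proofs are below) =====
def Claim_equal_find : Prop := ∀ (N : Int) (K : Int), Dom_find N K → Spec_find N K (find N K)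

-- ===== LEMMAS AND PROOFS =====

def tbl (T : Array Int) (m : ℕ) : Int := T.getD m 0

theorem tbl_set_self (T : Array Int) (n : ℕ) (v : Int) (h : n < T.size) :
    tbl (T.setIfInBounds n v) n = v := by
  rw [tbl, Array.getD_eq_getD_getElem?, Array.getElem?_setIfInBounds, if_pos rfl]
  simp [h]

theorem tbl_set_ne (T : Array Int) (n m : ℕ) (v : Int) (h : m ≠ n) :
    tbl (T.setIfInBounds n v) m = tbl T m := by
  rw [tbl, tbl, Array.getD_eq_getD_getElem?, Array.getD_eq_getD_getElem?,
    Array.getElem?_setIfInBounds, if_neg (Ne.symm h)]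

theorem emod_sub (x S M : Int) : (x % M - S) % M = (x - S) % M := by
  conv_rhs => rw [Int.sub_emod]
  rw [Int.sub_emod (x % M), Int.emod_emod_of_dvd _ dvd_rfl]

theorem Icc_int_insert (a b : ℤ) (h : a ≤ b) :
    Finset.Icc a b = insert a (Finset.Icc (a + 1) b) := by
  ext x; simp [Finset.mem_Icc]; omega

theorem findInner_size (K M i : Int) (js : List Int) (T : Array Int) :
    (findInner K M i js T).size = T.size := by
  induction js generalizing T with
  | nil => rfl
  | cons j js ih =>
    rw [findInner]
    split
    · rfl
    · rw [ih]; simp [aset]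

theorem findInner_tbl_ne (K M i : Int) (hi : 0 ≤ i) (js : List Int) (T : Array Int) (m : ℕ)
    (hm : (m : ℤ) ≠ i) :
    tbl (findInner K M i js T) m = tbl T m := by
  induction js generalizing T with
  | nil => rfl
  | cons j js ih =>
    rw [findInner]
    split
    · rfl
    · rw [ih]
      exact tbl_set_ne _ _ _ _ (by omega)

theorem findInner_val (K i : Int) (hi : 1 ≤ i) (hiK : i ≤ K) :
    ∀ (n : ℕ) (j0 : Int), 2 ≤ j0 → (K + 1 - j0).toNat = n →
    ∀ (T : Array Int), T.size = (K + 1).toNat →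
    tbl (findInner K 1000000007 i (PySem.List.pyRange j0 (K + 1) 1) T) i.toNat =
      if j0 ≤ K / i then
        (tbl T i.toNat - ∑ j ∈ Finset.Icc j0 (K / i), tbl T (i * j).toNat) % 1000000007
      else tbl T i.toNat := by
  intro n
  induction n using Nat.strong_induction_on with
  | _ n IH =>
    intro j0 hj0 hn T hT
    by_cases hend : K + 1 ≤ j0
    · rw [PySem.List.pyRange_one_eq_nil hend]
      have hdle : K / i ≤ K := Int.ediv_le_self _ (by omega)
      rw [if_neg (by omega)]
      rfl
    · rw [PySem.List.pyRange_one_cons (by omega), findInner]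
      by_cases hbr : i * j0 > K
      · rw [if_pos hbr]
        have : K / i < j0 := by
          rw [Int.ediv_lt_iff_lt_mul (by omega)]
          nlinarith
        rw [if_neg (by omega)]
      · rw [if_neg hbr]
        have hj0le : j0 ≤ K / i := by
          rw [Int.le_ediv_iff_mul_le (by omega)]
          nlinarith
        have hij0 : (0:ℤ) ≤ i * j0 := by positivity
        have hlti : i < i * j0 := by nlinarith
        have hset : aset T i (PySem.Int.mod (aget T i - aget T (i * j0)) 1000000007)
            = T.setIfInBounds i.toNat ((tbl T i.toNat - tbl T (i * j0).toNat) % 1000000007) := by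
          rw [PySem.Int.mod_eq_emod_of_pos (by norm_num)]
          rfl
        rw [hset, IH (K + 1 - (j0+1)).toNat (by omega) (j0 + 1) (by omega) rfl _ (by simp [hT])]
        have hsetself : tbl (T.setIfInBounds i.toNat
              ((tbl T i.toNat - tbl T (i * j0).toNat) % 1000000007)) i.toNat
            = (tbl T i.toNat - tbl T (i * j0).toNat) % 1000000007 :=
          tbl_set_self _ _ _ (by rw [hT]; omega)
        have hsetne : ∀ j ∈ Finset.Icc (j0 + 1) (K / i),
            tbl (T.setIfInBounds i.toNat
              ((tbl T i.toNat - tbl T (i * j0).toNat) % 1000000007)) (i * j).toNat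
            = tbl T (i * j).toNat := by
          intro j hj
          simp only [Finset.mem_Icc] at hj
          have h1 : i < i * j := by nlinarith
          exact tbl_set_ne _ _ _ _ (by omega)
        rw [if_pos hj0le]
        by_cases hcont : j0 + 1 ≤ K / i
        · rw [if_pos hcont, hsetself, Finset.sum_congr rfl hsetne,
            emod_sub, Icc_int_insert _ _ hj0le,
            Finset.sum_insert (by simp [Finset.mem_Icc])]
          ring_nf
        · have heq : j0 = K / i := by omega
          rw [if_neg hcont, hsetself, ← heq,
            show Finset.Icc j0 j0 = {j0} from Finset.Icc_self j0]
          simp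

theorem pyPow3_emod (b e : Int) :
    pyPow3 b e 1000000007 % 1000000007 = pyPow3 b e 1000000007 := by
  unfold pyPow3
  split_ifs <;> rw [PySem.Int.powMod_eq, PySem.Int.mod_eq_emod_of_pos (by norm_num)] <;>
    exact Int.emod_emod_of_dvd _ dvd_rfl

theorem findOuter_spec (N K : Int) (i0 : ℕ) (T : Array Int) (hiK : (i0 : ℤ) ≤ K)
    (hlen : T.size = (K + 1).toNat) :
    (findOuter N K 1000000007 (PySem.List.pyRange 2 (K + 1) 1)
      (PySem.List.pyRange (i0 : ℤ) 0 (-1)) T).size = T.size ∧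
    (∀ m : ℕ, i0 < m →
      tbl (findOuter N K 1000000007 (PySem.List.pyRange 2 (K + 1) 1)
        (PySem.List.pyRange (i0 : ℤ) 0 (-1)) T) m = tbl T m) ∧
    (∀ i : ℕ, 1 ≤ i → i ≤ i0 →
      tbl (findOuter N K 1000000007 (PySem.List.pyRange 2 (K + 1) 1)
          (PySem.List.pyRange (i0 : ℤ) 0 (-1)) T) i =
        (pyPow3 (PySem.Int.floordiv K (i : ℤ)) N 1000000007
          - ∑ j ∈ Finset.Icc 2 (K / (i : ℤ)),
              tbl (findOuter N K 1000000007 (PySem.List.pyRange 2 (K + 1) 1)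
                  (PySem.List.pyRange (i0 : ℤ) 0 (-1)) T)
                ((i : ℤ) * j).toNat) % 1000000007) := by
  induction i0 generalizing T with
  | zero =>
    rw [show ((0:ℕ):ℤ) = 0 by norm_num, PySem.List.pyRange_neg_one_eq_nil le_rfl]
    exact ⟨rfl, fun m _ => rfl, fun i h1 h0 => by omega⟩
  | succ i0 ih =>
    have hii : ((i0 + 1 : ℕ) : ℤ) = (i0 : ℤ) + 1 := by push_cast; ring
    have hiiK : (i0 : ℤ) + 1 ≤ K := by omega
    rw [hii, PySem.List.pyRange_neg_one_cons (by omega),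
      show (i0 : ℤ) + 1 - 1 = (i0 : ℤ) by ring, findOuter]
    set F := pyPow3 (PySem.Int.floordiv K ((i0 : ℤ) + 1)) N 1000000007 with hF
    have hT1 : aset T ((i0 : ℤ) + 1) F = T.setIfInBounds ((i0 : ℤ) + 1).toNat F := rfl
    rw [hT1]
    set T1 : Array Int := T.setIfInBounds ((i0 : ℤ) + 1).toNat F with hT1d
    have hlen1 : T1.size = (K + 1).toNat := by simp [hT1d, hlen]
    set T2 : Array Int := findInner K 1000000007 ((i0 : ℤ) + 1) (PySem.List.pyRange 2 (K + 1) 1) T1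
      with hT2d
    have hlen2 : T2.size = (K + 1).toNat := by rw [hT2d, findInner_size, hlen1]
    obtain ⟨ihlen, ihpres, ihval⟩ := ih T2 (by omega) hlen2
    refine ⟨by rw [ihlen]; simp [hT2d, findInner_size, hT1d], ?_, ?_⟩
    · intro m hm
      rw [ihpres m (by omega), hT2d,
        findInner_tbl_ne _ _ _ (by omega) _ _ _ (by push_cast; omega), hT1d,
        tbl_set_ne _ _ _ _ (by omega)]
    · intro i h1 hle
      by_cases htop : i ≤ i0
      · exact ihval i h1 htop
      · have hieq : i = i0 + 1 := by omega
        subst hieq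
        have hcast : ((i0 + 1 : ℕ) : ℤ) = (i0 : ℤ) + 1 := by push_cast; ring
        rw [hcast]
        have hpres1 : tbl (findOuter N K 1000000007 (PySem.List.pyRange 2 (K + 1) 1)
              (PySem.List.pyRange (i0:ℤ) 0 (-1)) T2) (i0 + 1)
            = tbl T2 (i0 + 1) := ihpres (i0 + 1) (by omega)
        have hidx : ((i0 : ℤ) + 1).toNat = i0 + 1 := by omega
        rw [show (i0 + 1 : ℕ) = ((i0 : ℤ) + 1).toNat from hidx.symm] at hpres1 ⊢
        rw [hpres1, hT2d,
          findInner_val K ((i0:ℤ)+1) (by omega) hiiK _ 2 (by omega) rfl T1 hlen1]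
        have hself : tbl T1 ((i0 : ℤ) + 1).toNat = F :=
          tbl_set_self _ _ _ (by rw [hlen]; omega)
        have hsum : ∀ j ∈ Finset.Icc (2:ℤ) (K / ((i0:ℤ)+1)),
            tbl T1 (((i0:ℤ)+1) * j).toNat
              = tbl (findOuter N K 1000000007 (PySem.List.pyRange 2 (K + 1) 1)
                    (PySem.List.pyRange (i0:ℤ) 0 (-1)) T2)
                  (((i0:ℤ)+1) * j).toNat := by
          intro j hj
          simp only [Finset.mem_Icc] at hj
          have hgt : (i0:ℤ) + 1 < ((i0:ℤ)+1) * j := by nlinarith [Int.natCast_nonneg i0]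
          have hj0 : (0:ℤ) ≤ ((i0:ℤ)+1) * j := by
            have : (0:ℤ) ≤ (i0:ℤ) := Int.natCast_nonneg i0
            nlinarith
          rw [ihpres (((i0:ℤ)+1) * j).toNat (by omega), hT2d,
            findInner_tbl_ne _ _ _ (by omega) _ _ _ (by push_cast; omega), hT1d,
            tbl_set_ne _ _ _ _ (by omega)]
        by_cases hc : 2 ≤ K / ((i0:ℤ)+1)
        · rw [if_pos hc, hself, Finset.sum_congr rfl hsum]
        · rw [if_neg hc, hself,
            show Finset.Icc (2:ℤ) (K / ((i0:ℤ)+1)) = ∅ by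
              apply Finset.Icc_eq_empty; omega]
          rw [Finset.sum_empty, sub_zero, hF, pyPow3_emod]

theorem toNat_ediv (a b : ℤ) (ha : 0 ≤ a) (hb : 0 ≤ b) :
    (a / b).toNat = a.toNat / b.toNat := by
  lift a to ℕ using ha; lift b to ℕ using hb
  rw [← Int.natCast_div]
  exact Int.toNat_natCast _

theorem sum_Icc_int_eq_nat (g : ℕ → ℤ) (a : ℕ) (ha : 1 ≤ a) (b : ℤ) :
    ∑ j ∈ Finset.Icc (a : ℤ) b, g j.toNat = ∑ j ∈ Finset.Icc a b.toNat, g j := by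
  refine Finset.sum_nbij' (fun j => j.toNat) (fun j => (j : ℤ)) ?_ ?_ ?_ ?_ ?_ <;>
    intros x hx <;> simp_all [Finset.mem_Icc] <;> omega

def Atable (N K : Int) : Array Int :=
  findOuter N K 1000000007 (PySem.List.pyRange 2 (K + 1) 1) (PySem.List.pyRange K 0 (-1))
    (Array.replicate (K + 1).toNat 1)

theorem Atable_rel (N K : Int) (hK : 0 < K) (i : ℕ) (h1 : 1 ≤ i) (hiK : (i : ℤ) ≤ K) :
    pyPow3 (PySem.Int.floordiv K (i : ℤ)) N 1000000007 ≡
      ∑ j ∈ Finset.Icc 1 (K.toNat / i), tbl (Atable N K) (i * j) [ZMOD 1000000007] := by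
  have hKc : ((K.toNat : ℕ) : ℤ) = K := Int.toNat_of_nonneg (by omega)
  have hA : Atable N K
      = findOuter N K 1000000007 (PySem.List.pyRange 2 (K + 1) 1)
          (PySem.List.pyRange ((K.toNat : ℕ) : ℤ) 0 (-1))
          (Array.replicate (K + 1).toNat 1) := by rw [hKc]; rfl
  obtain ⟨-, -, hval⟩ := findOuter_spec N K K.toNat (Array.replicate (K + 1).toNat 1)
    (by omega) (by simp)
  have hrel := hval i h1 (by omega)
  rw [← hA] at hrel
  -- convert the ℤ-indexed sum in hrel to the ℕ-indexed sum of the statement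
  have hconv : ∑ j ∈ Finset.Icc (2:ℤ) (K / (i : ℤ)), tbl (Atable N K) ((i : ℤ) * j).toNat
      = ∑ j ∈ Finset.Icc 2 (K.toNat / i), tbl (Atable N K) (i * j) := by
    have step1 : ∑ j ∈ Finset.Icc (2:ℤ) (K / (i : ℤ)), tbl (Atable N K) ((i : ℤ) * j).toNat
        = ∑ j ∈ Finset.Icc (2:ℤ) (K / (i : ℤ)), tbl (Atable N K) (i * j.toNat) := by
      apply Finset.sum_congr rfl
      intro j hj
      simp only [Finset.mem_Icc] at hj
      have hjn : (0:ℤ) ≤ j := by omega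
      have hji : (i : ℤ) * j = ((i * j.toNat : ℕ) : ℤ) := by
        push_cast [Int.toNat_of_nonneg hjn]; ring
      rw [hji, Int.toNat_natCast]
    rw [step1, show (2:ℤ) = ((2:ℕ) : ℤ) by norm_num,
      sum_Icc_int_eq_nat (fun jn => tbl (Atable N K) (i * jn)) 2 (by omega) (K / (i:ℤ)),
      toNat_ediv K (i:ℤ) (by omega) (by omega), Int.toNat_natCast]
  rw [hconv] at hrel
  -- Icc 1 q = insert 1 (Icc 2 q), and the entry at i*1 = i is hrel
  have hq1 : 1 ≤ K.toNat / i := (Nat.one_le_div_iff (by omega)).mpr (by omega)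
  rw [show Finset.Icc 1 (K.toNat / i) = insert 1 (Finset.Icc 2 (K.toNat / i)) by
      ext x; simp [Finset.mem_Icc]; omega,
    Finset.sum_insert (by simp), Nat.mul_one, hrel]
  set S := ∑ j ∈ Finset.Icc 2 (K.toNat / i), tbl (Atable N K) (i * j)
  set F := pyPow3 (PySem.Int.floordiv K (i : ℤ)) N 1000000007
  have h1 : (F - S) % 1000000007 ≡ F - S [ZMOD 1000000007] :=
    Int.emod_emod_of_dvd _ dvd_rfl
  have := h1.add_right S
  simpa using this.symm

theorem emod_add (a x M : Int) : (a % M + x) % M = (a + x) % M := by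
  conv_rhs => rw [Int.add_emod]
  rw [Int.add_emod (a % M), Int.emod_emod_of_dvd _ dvd_rfl]

theorem findAns_spec (Mv : Int) (hM : 0 < Mv) (T : Array Int) :
    ∀ (ks : List Int) (a : Int), a % Mv = a → (∀ k ∈ ks, 0 ≤ k) →
    findAns Mv T ks a = (a + (ks.map (fun k => tbl T k.toNat * k)).sum) % Mv := by
  intro ks
  induction ks with
  | nil => intro a ha _; simpa [findAns] using ha.symm
  | cons k ks ih =>
    intro a ha hks
    rw [findAns, PySem.Int.mod_eq_emod_of_pos hM,
      ih _ (Int.emod_emod_of_dvd _ dvd_rfl) (fun x hx => hks x (by simp [hx])),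
      emod_add]
    simp [aget, tbl, add_assoc]

theorem sum_map_pyRange (f : ℤ → ℤ) (n : ℕ) :
    ((PySem.List.pyRange 1 ((n : ℤ) + 1) 1).map f).sum = ∑ k ∈ Finset.Icc 1 n, f (k : ℤ) := by
  induction n with
  | zero => simp [PySem.List.pyRange_one_eq_nil]
  | succ n ih =>
    rw [show ((n + 1 : ℕ) : ℤ) + 1 = ((n : ℤ) + 1) + 1 by push_cast; ring,
      PySem.List.pyRange_one_succ_right (by omega), List.map_append, List.sum_append,
      ih, Finset.sum_Icc_succ_top (by omega)]
    push_cast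
    simp

theorem pyRange_step_cons (a b s : ℤ) (hs : 0 < s) (h : a < b) :
    PySem.List.pyRange a b s = a :: PySem.List.pyRange (a + s) b s := by
  rw [PySem.List.pyRange_of_pos _ _ hs, PySem.List.pyRange_of_pos _ _ hs, if_pos h]
  by_cases h2 : a + s < b
  · rw [if_pos h2]
    have hq : (b - a + s - 1) / s = (b - (a + s) + s - 1) / s + 1 := by
      have he : b - a + s - 1 = (b - (a + s) + s - 1) + 1 * s := by ring
      rw [he, Int.add_mul_ediv_right _ _ (by omega)]
    have hq0 : 0 ≤ (b - (a + s) + s - 1) / s := Int.ediv_nonneg (by omega) (by omega)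
    rw [hq, show ((b - (a + s) + s - 1) / s + 1).toNat
        = ((b - (a + s) + s - 1) / s).toNat + 1 by omega,
      List.range_succ_eq_map]
    simp only [List.map_cons, List.map_map, Nat.cast_zero, mul_zero, add_zero]
    congr 1
    apply List.map_congr_left
    intro k _
    simp only [Function.comp_apply]
    push_cast
    ring
  · rw [if_neg h2]
    have hb1 : 1 ≤ (b - a + s - 1) / s := (Int.le_ediv_iff_mul_le (by omega)).mpr (by omega)
    have hb2 : (b - a + s - 1) / s < 2 := (Int.ediv_lt_iff_lt_mul (by omega)).mpr (by omega)
    have : (b - a + s - 1) / s = 1 := by omega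
    simp [this]

theorem pyRange_step_nil (a b s : ℤ) (hs : 0 < s) (h : b ≤ a) :
    PySem.List.pyRange a b s = [] := by
  rw [PySem.List.pyRange_of_pos _ _ hs, if_neg (by omega)]
  simp

theorem altInner_size (K n : Int) (ms : List Int) (T : Array Int) :
    (altInner K n ms T).size = T.size := by
  induction ms generalizing T with
  | nil => rfl
  | cons m ms ih => rw [altInner, ih]; simp [aset]

theorem altInner_spec (K n : Int) (h1 : 1 ≤ n) (hnK : n ≤ K) :
    ∀ (fuel : ℕ) (c : Int), 2 ≤ c → (K + 1 - c * n).toNat = fuel →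
    ∀ (T : Array Int), T.size = (K + 1).toNat →
    ∀ m : ℕ,
      tbl (altInner K n (PySem.List.pyRange (c * n) (K + 1) n) T) m =
        if n ∣ (m : ℤ) ∧ c * n ≤ (m : ℤ) ∧ (m : ℤ) ≤ K then tbl T m - tbl T n.toNat
        else tbl T m := by
  intro fuel
  induction fuel using Nat.strong_induction_on with
  | _ fuel IH =>
    intro c hc hfuel T hT m
    have hn0 : (0:ℤ) < n := by omega
    have hcn0 : (0:ℤ) ≤ c * n := by positivity
    by_cases hend : K + 1 ≤ c * n
    · rw [pyRange_step_nil _ _ _ hn0 hend, if_neg (by rintro ⟨-, h2, h3⟩; omega)]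
      rfl
    · rw [pyRange_step_cons _ _ _ hn0 (by omega), altInner]
      have hnlt : n < c * n := by nlinarith
      have hset : aset T (c * n) (aget T (c * n) - aget T n)
          = T.setIfInBounds (c * n).toNat (tbl T (c * n).toNat - tbl T n.toNat) := rfl
      rw [hset, show c * n + n = (c + 1) * n by ring,
        IH (K + 1 - (c + 1) * n).toNat
          (by rw [show (c + 1) * n = c * n + n by ring]; omega)
          (c + 1) (by omega) rfl _ (by simp [hT]) m]
      set T' := T.setIfInBounds (c * n).toNat (tbl T (c * n).toNat - tbl T n.toNat) with hT'
      have hTn : tbl T' n.toNat = tbl T n.toNat := tbl_set_ne _ _ _ _ (by omega)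
      by_cases hnew : n ∣ (m:ℤ) ∧ (c + 1) * n ≤ (m:ℤ) ∧ (m:ℤ) ≤ K
      · have hmne : (m:ℤ) ≠ c * n := by nlinarith [hnew.2.1]
        rw [if_pos hnew, if_pos ⟨hnew.1, by nlinarith [hnew.2.1], hnew.2.2⟩, hTn, hT',
          tbl_set_ne _ _ _ _ (by omega)]
      · rw [if_neg hnew]
        by_cases hm0 : (m:ℤ) = c * n
        · have : m = (c * n).toNat := by omega
          rw [if_pos ⟨by rw [hm0]; exact ⟨c, by ring⟩, by omega, by omega⟩, this, hT',
            tbl_set_self _ _ _ (by rw [hT]; omega)]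
        · rw [hT', tbl_set_ne _ _ _ _ (by omega), if_neg ?_]
          rintro ⟨hd, hge, hle⟩
          apply hnew
          refine ⟨hd, ?_, hle⟩
          have hdvd : n ∣ (m:ℤ) - c * n := dvd_sub hd ⟨c, by ring⟩
          have hge2 : n ≤ (m:ℤ) - c * n := Int.le_of_dvd (by omega) hdvd
          rw [show (c + 1) * n = c * n + n by ring]
          omega

theorem totient_weight (m : ℕ) : ∑ d ∈ m.divisors, (Nat.totient d : ℤ) = (m : ℤ) := by
  rw [← Nat.cast_sum]
  exact_mod_cast congrArg (Nat.cast : ℕ → ℤ) (Nat.sum_totient m)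

def Sfil (t m : ℕ) : Finset ℕ := m.divisors.filter (fun d => d ≤ t ∧ d ≠ m)

theorem Sfil_succ (t m : ℕ) (hm : 1 ≤ m) :
    Sfil (t + 1) m = if (t + 1) ∣ m ∧ t + 1 ≠ m then insert (t + 1) (Sfil t m) else Sfil t m := by
  unfold Sfil
  split_ifs with h
  · ext d
    simp only [Finset.mem_filter, Finset.mem_insert, Nat.mem_divisors]
    constructor
    · rintro ⟨⟨hd, h0⟩, hdt, hne⟩
      by_cases hdeq : d = t + 1
      · exact Or.inl hdeq
      · exact Or.inr ⟨⟨hd, h0⟩, ⟨by omega, hne⟩⟩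
    · rintro (hdeq | ⟨⟨hd, h0⟩, hdt, hne⟩)
      · subst hdeq
        exact ⟨⟨h.1, by omega⟩, le_rfl, h.2⟩
      · exact ⟨⟨hd, h0⟩, by omega, hne⟩
  · ext d
    simp only [Finset.mem_filter, Nat.mem_divisors]
    constructor
    · rintro ⟨⟨hd, h0⟩, hdt, hne⟩
      refine ⟨⟨hd, h0⟩, ?_, hne⟩
      by_cases hdeq : d = t + 1
      · exact absurd ⟨hdeq ▸ hd, hdeq ▸ hne⟩ h
      · omega
    · rintro ⟨⟨hd, h0⟩, hdt, hne⟩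
      exact ⟨⟨hd, h0⟩, by omega, hne⟩

theorem multiple_lower (t m : ℕ) (hm : 1 ≤ m) (h : (t + 1) ∣ m) (hne : t + 1 ≠ m) :
    2 * (t + 1) ≤ m := by
  obtain ⟨e, he⟩ := h
  rcases Nat.lt_or_ge e 2 with he2 | he2
  · interval_cases e <;> omega
  · nlinarith

theorem Sfil_full (m t : ℕ) (hm : 1 ≤ m) (hmt : m ≤ t) :
    Sfil t m = m.divisors.erase m := by
  unfold Sfil
  ext d
  simp only [Finset.mem_filter, Finset.mem_erase, Nat.mem_divisors]
  constructor
  · rintro ⟨⟨hd, h0⟩, -, hne⟩; exact ⟨hne, hd, h0⟩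
  · rintro ⟨hne, hd, h0⟩
    exact ⟨⟨hd, h0⟩, le_trans (Nat.le_of_dvd (by omega) hd) hmt, hne⟩

theorem Sfil_pred (t : ℕ) :
    Sfil t (t + 1) = (t + 1).divisors.erase (t + 1) := by
  unfold Sfil
  ext d
  simp only [Finset.mem_filter, Finset.mem_erase, Nat.mem_divisors]
  constructor
  · rintro ⟨⟨hd, h0⟩, -, hne⟩; exact ⟨hne, hd, h0⟩
  · rintro ⟨hne, hd, h0⟩
    have := Nat.le_of_dvd (by omega) hd
    exact ⟨⟨hd, h0⟩, by omega, hne⟩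

theorem sum_erase_totient (m : ℕ) (hm : 1 ≤ m) :
    ∑ d ∈ m.divisors.erase m, (Nat.totient d : ℤ) = (m : ℤ) - (Nat.totient m : ℤ) := by
  rw [Finset.sum_erase_eq_sub (Nat.mem_divisors_self m (by omega)), totient_weight]

theorem altOuter_spec (K : Int) (hK : 0 < K) :
    ∀ (fuel : ℕ) (t : ℕ), t ≤ K.toNat → K.toNat - t = fuel →
    ∀ (T : Array Int), T.size = (K + 1).toNat →
    (∀ m : ℕ, 1 ≤ m → m ≤ K.toNat →
      tbl T m = (m : ℤ) - ∑ d ∈ Sfil t m, (Nat.totient d : ℤ)) →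
    ∀ m : ℕ, 1 ≤ m → m ≤ K.toNat →
      tbl (altOuter K (PySem.List.pyRange ((t : ℤ) + 1) (K + 1) 1) T) m = (Nat.totient m : ℤ) := by
  intro fuel
  induction fuel using Nat.strong_induction_on with
  | _ fuel IH =>
    intro t ht hfuel T hT hinv m hm1 hmK
    by_cases hdone : t = K.toNat
    · subst hdone
      rw [PySem.List.pyRange_one_eq_nil (by omega)]
      show tbl T m = _
      rw [hinv m hm1 hmK, Sfil_full m K.toNat hm1 hmK, sum_erase_totient m hm1]
      ring
    · have htlt : t < K.toNat := by omega
      have hc : ((t : ℤ) + 1) < K + 1 := by omega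
      rw [PySem.List.pyRange_one_cons hc, altOuter]
      have hn1 : (1:ℤ) ≤ (t : ℤ) + 1 := by omega
      have hnK : (t : ℤ) + 1 ≤ K := by omega
      -- phi[t+1] is already final when pass t+1 starts
      have hTn : tbl T (t + 1) = (Nat.totient (t + 1) : ℤ) := by
        rw [hinv (t + 1) (by omega) (by omega), Sfil_pred t,
          sum_erase_totient (t + 1) (by omega)]
        ring
      have hspec := altInner_spec K ((t : ℤ) + 1) hn1 hnK
        (K + 1 - 2 * ((t : ℤ) + 1)).toNat 2 le_rfl rfl T hT
      have hlen' : (altInner K ((t:ℤ)+1)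
          (PySem.List.pyRange (2 * ((t:ℤ)+1)) (K + 1) ((t:ℤ)+1)) T).size = (K+1).toNat := by
        rw [altInner_size, hT]
      have hnat : ((t:ℤ)+1).toNat = t + 1 := by omega
      have hinv' : ∀ m : ℕ, 1 ≤ m → m ≤ K.toNat →
          tbl (altInner K ((t:ℤ)+1)
            (PySem.List.pyRange (2 * ((t:ℤ)+1)) (K + 1) ((t:ℤ)+1)) T) m
          = (m : ℤ) - ∑ d ∈ Sfil (t + 1) m, (Nat.totient d : ℤ) := by
        intro m hm1 hmK
        rw [hspec m]
        by_cases hdN : (t + 1) ∣ m ∧ t + 1 ≠ m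
        · have h2 : 2 * (t + 1) ≤ m := multiple_lower t m hm1 hdN.1 hdN.2
          rw [if_pos ⟨Int.natCast_dvd_natCast.mpr hdN.1, by push_cast; omega, by omega⟩,
            hnat, hTn, hinv m hm1 hmK, Sfil_succ t m hm1, if_pos hdN,
            Finset.sum_insert (by
              unfold Sfil
              simp only [Finset.mem_filter]
              rintro ⟨-, h', -⟩
              omega)]
          ring
        · rw [if_neg ?_, hinv m hm1 hmK, Sfil_succ t m hm1, if_neg hdN]
          rintro ⟨hdvd, hge, -⟩
          apply hdN
          have hdvdN : (t + 1) ∣ m := by exact_mod_cast hdvd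
          refine ⟨hdvdN, ?_⟩
          have : 2 * (t + 1) ≤ m := by push_cast at hge; omega
          omega
      have hfin := IH (K.toNat - (t + 1)) (by omega) (t + 1) (by omega) rfl _ hlen' hinv' m hm1 hmK
      rw [show ((t + 1 : ℕ) : ℤ) + 1 = ((t : ℤ) + 1) + 1 by push_cast; ring] at hfin
      exact hfin

theorem Sfil_zero (m : ℕ) (hm : 1 ≤ m) : Sfil 0 m = ∅ := by
  unfold Sfil
  ext d
  simp only [Finset.mem_filter, Nat.mem_divisors, Finset.notMem_empty, iff_false]
  rintro ⟨⟨hd, h0⟩, hdt, -⟩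
  interval_cases d
  exact h0 (Nat.eq_zero_of_zero_dvd hd)

theorem tbl_range0 (K : Int) (m : ℕ) (hm : (m : ℤ) < K + 1) :
    tbl (PySem.List.pyRange 0 (K + 1) 1).toArray m = (m : ℤ) := by
  rw [show tbl (PySem.List.pyRange 0 (K + 1) 1).toArray m
      = (PySem.List.pyRange 0 (K + 1) 1).getD m 0 from by
    rw [tbl, Array.getD_eq_getD_getElem?, List.getD, List.getElem?_toArray]]
  rw [PySem.List.pyRange_one]
  have hlt : m < (K + 1 - 0).toNat := by omega
  simp only [List.getD, List.getElem?_map]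
  rw [List.getElem?_range hlt]
  simp

def Btable (K : Int) : Array Int :=
  altOuter K (PySem.List.pyRange 1 (K + 1) 1) (PySem.List.pyRange 0 (K + 1) 1).toArray

theorem Btable_phi (K : Int) (hK : 0 < K) (m : ℕ) (h1 : 1 ≤ m) (hmK : m ≤ K.toNat) :
    tbl (Btable K) m = (Nat.totient m : ℤ) := by
  have h0 : ((0 : ℕ) : ℤ) + 1 = (1 : ℤ) := by norm_num
  have := altOuter_spec K hK K.toNat 0 (by omega) rfl (PySem.List.pyRange 0 (K + 1) 1).toArray
    (by rw [List.size_toArray, PySem.List.length_pyRange_one]; congr 1; ring)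
    (fun m hm1 hmK => by rw [tbl_range0 K m (by omega), Sfil_zero m hm1, Finset.sum_empty]; ring)
    m h1 hmK
  rw [h0] at this
  exact this

theorem altAns_spec (N K Mv : Int) (hM : 0 < Mv) (T : Array Int) :
    ∀ (ds : List Int) (a : Int), a % Mv = a → (∀ d ∈ ds, 0 ≤ d) →
    altAns N K Mv T ds a =
      (a + (ds.map (fun d => tbl T d.toNat * pyPow3 (PySem.Int.floordiv K d) N Mv)).sum) % Mv := by
  intro ds
  induction ds with
  | nil => intro a ha _; simpa [altAns] using ha.symm
  | cons d ds ih =>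
    intro a ha hds
    rw [altAns, PySem.Int.mod_eq_emod_of_pos hM,
      ih _ (Int.emod_emod_of_dvd _ dvd_rfl) (fun x hx => hds x (by simp [hx])),
      emod_add]
    simp [aget, tbl, add_assoc]

theorem hyperbola (n : ℕ) (f : ℕ → ℕ → ℤ) :
    ∑ d ∈ Finset.Icc 1 n, ∑ j ∈ Finset.Icc 1 (n / d), f d (d * j)
      = ∑ m ∈ Finset.Icc 1 n, ∑ d ∈ m.divisors, f d m := by
  rw [Finset.sum_sigma', Finset.sum_sigma']
  refine Finset.sum_nbij' (fun p => ⟨p.1 * p.2, p.1⟩) (fun p => ⟨p.2, p.1 / p.2⟩)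
    ?_ ?_ ?_ ?_ ?_
  · rintro ⟨d, j⟩ hp
    simp only [Finset.mem_sigma, Finset.mem_Icc, Nat.mem_divisors] at hp ⊢
    obtain ⟨⟨hd1, hdn⟩, hj1, hjd⟩ := hp
    have hmul : d * j ≤ n := by
      rw [Nat.le_div_iff_mul_le (by omega)] at hjd
      rw [mul_comm]
      exact hjd
    exact ⟨⟨Nat.mul_pos (by omega) (by omega), hmul⟩, ⟨j, rfl⟩,
      Nat.mul_ne_zero (by omega) (by omega)⟩
  · rintro ⟨m, d⟩ hp
    simp only [Finset.mem_sigma, Finset.mem_Icc, Nat.mem_divisors] at hp ⊢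
    obtain ⟨⟨hm1, hmn⟩, hd, h0⟩ := hp
    have hd1 : 1 ≤ d := Nat.pos_of_dvd_of_pos hd (by omega)
    have hdm : d ≤ m := Nat.le_of_dvd (by omega) hd
    exact ⟨⟨hd1, le_trans hdm hmn⟩,
      (Nat.one_le_div_iff (by omega)).mpr hdm, Nat.div_le_div_right hmn⟩
  · rintro ⟨d, j⟩ hp
    simp only [Finset.mem_sigma, Finset.mem_Icc] at hp
    have : d * j / d = j := Nat.mul_div_cancel_left j (by omega)
    simp [this]
  · rintro ⟨m, d⟩ hp
    simp only [Finset.mem_sigma, Finset.mem_Icc, Nat.mem_divisors] at hp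
    have : d * (m / d) = m := Nat.mul_div_cancel' hp.2.1
    simp [this]
  · intro p _
    rfl

theorem find_eq (N K : Int) : find N K = find_alt N K := by
  by_cases hK : 0 < K
  · have hA : find N K = findAns 1000000007 (Atable N K) (PySem.List.pyRange 1 (K + 1) 1) 0 := rfl
    have hB : find_alt N K
        = altAns N K 1000000007 (Btable K) (PySem.List.pyRange 1 (K + 1) 1) 0 := rfl
    have hKc : ((K.toNat : ℕ) : ℤ) = K := Int.toNat_of_nonneg (by omega)
    have hrange : (K + 1 : ℤ) = ((K.toNat : ℤ) + 1) := by omega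
    rw [hA, hB,
      findAns_spec _ (by norm_num) _ _ 0 (by norm_num) (fun k hk => by
        rw [PySem.List.mem_pyRange_one] at hk; omega),
      altAns_spec _ _ _ (by norm_num) _ _ 0 (by norm_num) (fun d hd => by
        rw [PySem.List.mem_pyRange_one] at hd; omega),
      hrange, sum_map_pyRange, sum_map_pyRange]
    have hsimpA : ∀ k ∈ Finset.Icc 1 K.toNat,
        tbl (Atable N K) ((k : ℤ)).toNat * (k : ℤ) = tbl (Atable N K) k * (k : ℤ) := by
      intro k _; rw [Int.toNat_natCast]
    have hsimpB : ∀ d ∈ Finset.Icc 1 K.toNat,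
        tbl (Btable K) ((d : ℤ)).toNat * pyPow3 (PySem.Int.floordiv K (d : ℤ)) N 1000000007
          = (Nat.totient d : ℤ) * pyPow3 (PySem.Int.floordiv K (d : ℤ)) N 1000000007 := by
      intro d hd
      simp only [Finset.mem_Icc] at hd
      rw [Int.toNat_natCast, Btable_phi K hK d hd.1 hd.2]
    rw [Finset.sum_congr rfl hsimpA, Finset.sum_congr rfl hsimpB]
    have hcong : (∑ d ∈ Finset.Icc 1 K.toNat,
          (Nat.totient d : ℤ) * pyPow3 (PySem.Int.floordiv K (d : ℤ)) N 1000000007)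
        ≡ (∑ k ∈ Finset.Icc 1 K.toNat, tbl (Atable N K) k * (k : ℤ)) [ZMOD 1000000007] := by
      have step1 : (∑ d ∈ Finset.Icc 1 K.toNat,
            (Nat.totient d : ℤ) * pyPow3 (PySem.Int.floordiv K (d : ℤ)) N 1000000007)
          ≡ (∑ d ∈ Finset.Icc 1 K.toNat,
            (Nat.totient d : ℤ) * ∑ j ∈ Finset.Icc 1 (K.toNat / d), tbl (Atable N K) (d * j))
            [ZMOD 1000000007] := by
        apply Int.ModEq.sum
        intro d hd
        simp only [Finset.mem_Icc] at hd
        exact (Atable_rel N K hK d hd.1 (by omega)).mul_left _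
      have step2 : (∑ d ∈ Finset.Icc 1 K.toNat,
            (Nat.totient d : ℤ) * ∑ j ∈ Finset.Icc 1 (K.toNat / d), tbl (Atable N K) (d * j))
          = ∑ k ∈ Finset.Icc 1 K.toNat, tbl (Atable N K) k * (k : ℤ) := by
        calc (∑ d ∈ Finset.Icc 1 K.toNat,
              (Nat.totient d : ℤ) * ∑ j ∈ Finset.Icc 1 (K.toNat / d), tbl (Atable N K) (d * j))
            = ∑ d ∈ Finset.Icc 1 K.toNat, ∑ j ∈ Finset.Icc 1 (K.toNat / d),
                (Nat.totient d : ℤ) * tbl (Atable N K) (d * j) := by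
              apply Finset.sum_congr rfl
              intro d _
              rw [Finset.mul_sum]
          _ = ∑ m ∈ Finset.Icc 1 K.toNat, ∑ d ∈ m.divisors,
                (Nat.totient d : ℤ) * tbl (Atable N K) m :=
              hyperbola K.toNat (fun d m => (Nat.totient d : ℤ) * tbl (Atable N K) m)
          _ = ∑ m ∈ Finset.Icc 1 K.toNat, tbl (Atable N K) m * (m : ℤ) := by
              apply Finset.sum_congr rfl
              intro m hm
              simp only [Finset.mem_Icc] at hm
              rw [← Finset.sum_mul, totient_weight m]
              ring
      exact step1.trans (by rw [step2])
    have : (0 + ∑ d ∈ Finset.Icc 1 K.toNat,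
          (Nat.totient d : ℤ) * pyPow3 (PySem.Int.floordiv K (d : ℤ)) N 1000000007) % 1000000007
        = (0 + ∑ k ∈ Finset.Icc 1 K.toNat, tbl (Atable N K) k * (k : ℤ)) % 1000000007 := by
      simp only [zero_add]
      exact hcong
    exact this.symm
  · have h1 : PySem.List.pyRange K 0 (-1) = [] := PySem.List.pyRange_neg_one_eq_nil (by omega)
    have h2 : PySem.List.pyRange 1 (K + 1) 1 = [] := PySem.List.pyRange_one_eq_nil (by omega)
    unfold find find_alt
    rw [h1, h2]
    rfl

-- ===== VERDICT (by name: the statement is the Claim_ definition above) =====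
theorem find_spec : Claim_equal_find := by
  intro N K _
  unfold Spec_find
  exact find_eq N K
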